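-- pv_equiv track=rewrite | github.com/usdivad/jazz-ai-experiments | jazzaiexperiments/midi.py | split_subsequences
-- ===== SOURCE A (Python) =====
-- def create_note_set(note_events):
--     """Create note set from note events."""
--     note_set = sorted(list(set(note_events)))
--     return note_set
--
-- def map_note_to_int(note_events):
--     """Map notes to unique ints, and back."""
--     note_set = create_note_set(note_events)
--     note_to_int = dict((n, i) for i, n in enumerate(note_set))
--     int_to_note = dict((i, n) for i, n in enumerate(note_set))
--     return (note_to_int, int_to_note)
--
-- def split_subsequences(note_events, seq_length=10):
--     """Split note events into subsequences (to feed into the model)."""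
--     data_input = []  # "X"
--     data_output = []  # "y"
--     note_to_int, int_to_note = map_note_to_int(note_events)
--
--     for i in range(len(note_events) - seq_length):
--         seqs_input = note_events[i:i + seq_length]
--         seqs_output = note_events[i + seq_length]
--         data_input.append([note_to_int[note] for note in seqs_input])
--         data_output.append(note_to_int[seqs_output])
--
--     return (data_input, data_output)
-- ===== SOURCE B (Python) =====
-- def split_subsequences(note_events, seq_length=10):
--     """Split note events into subsequences (to feed into the model)."""
--     note_to_int = {n: i for i, n in enumerate(sorted(set(note_events)))}
--     data_input = []  # "X"
--     data_output = []  # "y"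
--     window = []
--     for note in note_events:
--         code = note_to_int[note]
--         if len(window) == seq_length:
--             data_input.append(list(window))
--             data_output.append(code)
--         window.append(code)
--         if len(window) > seq_length:
--             window.pop(0)
--     return (data_input, data_output)
-- ===== Notes on version B (the rewrite author's own statement) =====
-- stated objective: faster
-- what changed: B replaces A's indexed loop that slices note_events and re-maps every window through the dict with a single online pass maintaining a sliding window of the last seq_length int codes, emitting (window, code) when the window is full; each note is dict-mapped once instead of seq_length+1 times.
-- intended difference: For negative seq_length (with -len <= seq_length so A returns), A returns windows accidentally built from negative-stop slices and wraparound indexing, e.g. ([[],[]],[0,0]) on (['a'],-1); B returns ([],[]) since no window of negative length exists, which is the intended value. — e.g. on split_subsequences(["a"], -1): A returns ([[], []], [0, 0]), B returns ([], [])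
import Mathlib
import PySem

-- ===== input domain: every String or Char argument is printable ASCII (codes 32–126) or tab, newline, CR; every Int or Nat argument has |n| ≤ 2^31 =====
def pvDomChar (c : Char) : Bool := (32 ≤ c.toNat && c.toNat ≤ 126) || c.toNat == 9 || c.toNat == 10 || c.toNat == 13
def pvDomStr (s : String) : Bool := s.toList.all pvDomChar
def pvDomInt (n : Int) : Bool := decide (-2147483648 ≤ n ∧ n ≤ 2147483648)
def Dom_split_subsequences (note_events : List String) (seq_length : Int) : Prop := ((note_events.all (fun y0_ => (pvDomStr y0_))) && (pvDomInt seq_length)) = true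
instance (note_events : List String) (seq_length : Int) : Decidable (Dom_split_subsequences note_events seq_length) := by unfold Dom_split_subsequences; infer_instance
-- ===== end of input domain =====

-- B is a single online pass keeping a sliding window of the last seq_length int codes, so each
-- note is dict-mapped once instead of once per window as in A's slice-and-remap loop (objective: faster).

-- ===== PORT A =====
def split_subsequences (note_events : List String) (seq_length : Int) : List (List Int) × List Int :=
  let note_set := PySem.List.sorted (PySem.Set.ofList note_events) (fun x => x) false
  let note_to_int := PySem.Dict.ofList ((PySem.List.enumerate note_set 0).map (fun p => (p.2, p.1)))
  let _int_to_note := PySem.Dict.ofList (PySem.List.enumerate note_set 0)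
  (PySem.List.pyRange 0 ((note_events.length : Int) - seq_length) 1).foldl
    (fun (acc : List (List Int) × List Int) i =>
      let seqs_input := PySem.List.slice note_events (some i) (some (i + seq_length))
      let seqs_output := PySem.List.pyGetD note_events (i + seq_length) ""
      (acc.1 ++ [seqs_input.map (fun note => note_to_int.getD note 0)],
       acc.2 ++ [note_to_int.getD seqs_output 0]))
    ([], [])

-- ===== PORT B =====
def split_subsequences_alt (note_events : List String) (seq_length : Int) : List (List Int) × List Int :=
  let note_to_int := PySem.Dict.ofList
    ((PySem.List.enumerate (PySem.List.sorted (PySem.Set.ofList note_events) (fun x => x) false) 0).map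
      (fun p => (p.2, p.1)))
  let st := note_events.foldl
    (fun (st : List (List Int) × List Int × List Int) note =>
      let code := note_to_int.getD note 0
      let p := if (st.2.2.length : Int) = seq_length
               then (st.1 ++ [st.2.2], st.2.1 ++ [code]) else (st.1, st.2.1)
      let w := st.2.2 ++ [code]
      (p.1, p.2, if seq_length < (w.length : Int) then w.tail else w))
    ([], [], [])
  (st.1, st.2.1)

-- ===== PRECONDITION & SPEC =====
-- A raises IndexError (note_events[i + seq_length] out of range) exactly when seq_length < -len(note_events); only those inputs are excluded.
def Pre_split_subsequences (note_events : List String) (seq_length : Int) : Prop :=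
  -(note_events.length : Int) ≤ seq_length
instance (note_events : List String) (seq_length : Int) : Decidable (Pre_split_subsequences note_events seq_length) := by unfold Pre_split_subsequences; infer_instance
def pvWitness_split_subsequences : List String × Int := (["c", "a", "b", "a"], 2)

-- For negative seq_length (with -len ≤ seq_length so A returns), A returns windows accidentally
-- built from negative-stop slices and wraparound indexing; B returns ([], []) since no window of
-- negative length exists, which is the intended value.
def D_split_subsequences (note_events : List String) (seq_length : Int) : Prop := seq_length < 0
instance (note_events : List String) (seq_length : Int) : Decidable (D_split_subsequences note_events seq_length) := by unfold D_split_subsequences; infer_instance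

def Spec_split_subsequences (note_events : List String) (seq_length : Int) (out : List (List Int) × List Int) : Prop := ¬ D_split_subsequences note_events seq_length → out = split_subsequences_alt note_events seq_length
instance (note_events : List String) (seq_length : Int) (out : List (List Int) × List Int) : Decidable (Spec_split_subsequences note_events seq_length out) := by unfold Spec_split_subsequences; infer_instance

def pvDiffWitness_split_subsequences : List String × Int := (["a"], -1)
def pvDiffWitnessOut_split_subsequences : (List (List Int) × List Int) × (List (List Int) × List Int) :=
  (([[], []], [0, 0]), ([], []))

-- ===== CLAIM (what is proved, stated in full; the proofs are below) =====
def Claim_unchanged_split_subsequences : Prop := ∀ (note_events : List String) (seq_length : Int), Dom_split_subsequences note_events seq_length → Pre_split_subsequences note_events seq_length → Spec_split_subsequences note_events seq_length (split_subsequences note_events seq_length)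
def Claim_changed_split_subsequences : Prop := Dom_split_subsequences (pvDiffWitness_split_subsequences.1) (pvDiffWitness_split_subsequences.2) ∧ Pre_split_subsequences (pvDiffWitness_split_subsequences.1) (pvDiffWitness_split_subsequences.2) ∧ D_split_subsequences (pvDiffWitness_split_subsequences.1) (pvDiffWitness_split_subsequences.2) ∧ split_subsequences (pvDiffWitness_split_subsequences.1) (pvDiffWitness_split_subsequences.2) = pvDiffWitnessOut_split_subsequences.1 ∧ split_subsequences_alt (pvDiffWitness_split_subsequences.1) (pvDiffWitness_split_subsequences.2) = pvDiffWitnessOut_split_subsequences.2 ∧ pvDiffWitnessOut_split_subsequences.1 ≠ pvDiffWitnessOut_split_subsequences.2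
def Claim_exact_split_subsequences : Prop := ∀ (note_events : List String) (seq_length : Int), Dom_split_subsequences note_events seq_length → Pre_split_subsequences note_events seq_length → D_split_subsequences note_events seq_length → split_subsequences note_events seq_length ≠ split_subsequences_alt note_events seq_length

-- ===== LEMMAS AND PROOFS =====

-- slicing commutes with mapping
theorem pv_slice_map {α β : Type} (h : α → β) (xs : List α) (a b : Int) :
    PySem.List.slice (xs.map h) (some a) (some b) = (PySem.List.slice xs (some a) (some b)).map h := by
  simp [PySem.List.slice, PySem.List.clampIdx, List.map_drop, List.map_take]

-- in-range indexing commutes with mapping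
theorem pv_pyGetD_map {α β : Type} [Inhabited α] [Inhabited β] (h : α → β) (xs : List α) (i : Int)
    (d : α) (d' : β) (h1 : -(xs.length : Int) ≤ i) (h2 : i < (xs.length : Int)) :
    PySem.List.pyGetD (xs.map h) i d' = h (PySem.List.pyGetD xs i d) := by
  by_cases hi : 0 ≤ i
  · rw [PySem.List.pyGetD_eq_getElem (xs.map h) d' hi (by simpa using h2),
        PySem.List.pyGetD_eq_getElem xs d hi h2]
    simp
  · have hk : i = -(((-i).toNat : Nat) : Int) := by omega
    have hle : (-i).toNat ≤ xs.length := by omega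
    rw [hk, PySem.List.pyGetD_neg_natCast (xs.map h) (-i).toNat d' (by omega) (by simpa using hle),
        PySem.List.pyGetD_neg_natCast xs (-i).toNat d (by omega) hle]
    simp

-- B's sliding-window fold characterised: after folding the mapped list m with window size l,
-- the emitted pairs are exactly the indexed windows and the window holds the last l elements.
theorem pvB_fold_inv (l : Nat) (m : List Int) :
    m.foldl
      (fun (st : List (List Int) × List Int × List Int) code =>
        let p := if (st.2.2.length : Int) = (l : Int)
                 then (st.1 ++ [st.2.2], st.2.1 ++ [code]) else (st.1, st.2.1)
        let w := st.2.2 ++ [code]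
        (p.1, p.2, if (l : Int) < (w.length : Int) then w.tail else w))
      ([], [], [])
    = ((List.range (m.length - l)).map (fun k => (m.drop k).take l),
       (List.range (m.length - l)).map (fun k => m.getD (k + l) 0),
       m.drop (m.length - l)) := by
  induction m using List.reverseRecOn with
  | nil => simp
  | append_singleton xs x ih =>
    rw [List.foldl_append, ih]
    simp only [List.foldl_cons, List.foldl_nil, List.length_append, List.length_drop,
      List.length_singleton]
    by_cases hge : l ≤ xs.length
    · have hcond : ((xs.length - (xs.length - l) : Nat) : Int) = (l : Int) := by omega
      rw [if_pos hcond]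
      have hlen : (xs.drop (xs.length - l)).length = l := by simp; omega
      have hrange : xs.length + 1 - l = (xs.length - l) + 1 := by omega
      refine Prod.ext ?_ (Prod.ext ?_ ?_) <;> simp only []
      · rw [hrange, List.range_succ, List.map_append, List.map_singleton]
        congr 1
        · apply List.map_congr_left
          intro k hk
          have hk' : k < xs.length - l := by simpa using hk
          rw [List.drop_append_of_le_length (by omega),
              List.take_append_of_le_length (by simp; omega)]
        · rw [List.drop_append_of_le_length (by omega),
              List.take_append_of_le_length (by simp; omega)]
          simp [List.take_of_length_le (le_of_eq hlen)]
      · rw [hrange, List.range_succ, List.map_append, List.map_singleton]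
        congr 1
        · apply List.map_congr_left
          intro k hk
          have hk' : k < xs.length - l := by simpa using hk
          have : k + l < xs.length := by omega
          simp [List.getD, List.getElem?_append_left this]
        · have : xs.length - l + l = xs.length := by omega
          simp [List.getD, this]
      · rw [if_pos (show (l : Int) < ((xs.length - (xs.length - l) + 1 : Nat) : Int) by
          push_cast; omega)]
        rcases Nat.eq_zero_or_pos l with hl0 | hlpos
        · subst hl0; simp
        · have hne : xs.drop (xs.length - l) ≠ [] := by
            intro h; have := congrArg List.length h; simp at this; omega
          rw [List.tail_append_of_ne_nil hne, List.tail_drop,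
              List.drop_append_of_le_length (by omega)]
          congr 2
          omega
    · have hcond : ¬ ((xs.length - (xs.length - l) : Nat) : Int) = (l : Int) := by
        intro h; omega
      rw [if_neg hcond]
      have h0 : xs.length - l = 0 := by omega
      have h0' : xs.length + 1 - l = 0 := by omega
      rw [if_neg (show ¬ (l : Int) < ((xs.length - (xs.length - l) + 1 : Nat) : Int) by
        push_cast; omega)]
      simp [h0, h0']

-- for negative seq_length B emits nothing: the window condition can never hold
theorem pvB_neg (note_events : List String) (seq_length : Int) (h : seq_length < 0) :
    split_subsequences_alt note_events seq_length = ([], []) := by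
  unfold split_subsequences_alt
  suffices hfold :
      ∀ (f : String → Int) (ne : List String),
        ne.foldl
          (fun (st : List (List Int) × List Int × List Int) note =>
            let code := f note
            let p := if (st.2.2.length : Int) = seq_length
                     then (st.1 ++ [st.2.2], st.2.1 ++ [code]) else (st.1, st.2.1)
            let w := st.2.2 ++ [code]
            (p.1, p.2, if seq_length < (w.length : Int) then w.tail else w))
          ([], [], []) = ([], [], []) by
    simp only []
    rw [hfold]
  intro f ne
  induction ne with
  | nil => rfl
  | cons a t ih =>
    simp only [List.foldl_cons]
    rw [if_neg (by simp; omega), if_pos (by simp; omega)]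
    simpa using ih

-- A rewritten as two maps over the range (its fold splits componentwise)
theorem pvA_maps (note_events : List String) (seq_length : Int) :
    split_subsequences note_events seq_length =
      ((PySem.List.pyRange 0 ((note_events.length : Int) - seq_length) 1).map
        (fun i => (PySem.List.slice note_events (some i) (some (i + seq_length))).map
          (fun note => (PySem.Dict.ofList
            ((PySem.List.enumerate (PySem.List.sorted (PySem.Set.ofList note_events) (fun x => x) false) 0).map
              (fun p => (p.2, p.1)))).getD note 0)),
       (PySem.List.pyRange 0 ((note_events.length : Int) - seq_length) 1).map
        (fun i => (PySem.Dict.ofList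
            ((PySem.List.enumerate (PySem.List.sorted (PySem.Set.ofList note_events) (fun x => x) false) 0).map
              (fun p => (p.2, p.1)))).getD (PySem.List.pyGetD note_events (i + seq_length) "") 0)) := by
  unfold split_subsequences
  rw [PySem.List.foldl_prod_mk
      (f := fun (acc : List (List Int)) (i : Int) =>
        acc ++ [(PySem.List.slice note_events (some i) (some (i + seq_length))).map
          (fun note => (PySem.Dict.ofList ((PySem.List.enumerate (PySem.List.sorted (PySem.Set.ofList note_events) (fun x => x) false) 0).map (fun p => (p.2, p.1)))).getD note 0)])
      (g := fun (acc : List Int) (i : Int) =>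
        acc ++ [(PySem.Dict.ofList ((PySem.List.enumerate (PySem.List.sorted (PySem.Set.ofList note_events) (fun x => x) false) 0).map (fun p => (p.2, p.1)))).getD (PySem.List.pyGetD note_events (i + seq_length) "") 0])]
  rw [PySem.List.foldl_append_singleton_eq_map, PySem.List.foldl_append_singleton_eq_map]
  simp

-- ===== VERDICT (by name: the statement is the Claim_ definition above) =====
theorem split_subsequences_spec : Claim_unchanged_split_subsequences := by
  intro ne L _ hpre hnd
  unfold D_split_subsequences at hnd
  have hL : 0 ≤ L := by omega
  have hLl : L = (L.toNat : Int) := by omega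
  rw [pvA_maps]
  unfold split_subsequences_alt
  simp only []
  rw [← List.foldl_map (f := fun note => (PySem.Dict.ofList
        ((PySem.List.enumerate (PySem.List.sorted (PySem.Set.ofList ne) (fun x => x) false) 0).map
          (fun p => (p.2, p.1)))).getD note 0)
      (g := fun (st : List (List Int) × List Int × List Int) code =>
        let p := if (st.2.2.length : Int) = L
                 then (st.1 ++ [st.2.2], st.2.1 ++ [code]) else (st.1, st.2.1)
        let w := st.2.2 ++ [code]
        (p.1, p.2, if L < (w.length : Int) then w.tail else w))]
  rw [hLl]
  rw [pvB_fold_inv L.toNat]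
  simp only [List.length_map]
  rw [PySem.List.pyRange_one]
  have hn : (((ne.length : Int) - (L.toNat : Int) - 0).toNat) = ne.length - L.toNat := by omega
  rw [hn, List.map_map, List.map_map]
  refine Prod.ext ?_ ?_ <;> simp only []
  · apply List.map_congr_left
    intro k hk
    have hk' : k < ne.length - L.toNat := by simpa using hk
    simp only [Function.comp, zero_add]
    rw [← pv_slice_map, PySem.List.slice_natCast_add]
  · apply List.map_congr_left
    intro k hk
    have hk' : k < ne.length - L.toNat := by simpa using hk
    simp only [Function.comp, zero_add]
    rw [← pv_pyGetD_map (fun note => (PySem.Dict.ofList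
          ((PySem.List.enumerate (PySem.List.sorted (PySem.Set.ofList ne) (fun x => x) false) 0).map
            (fun p => (p.2, p.1)))).getD note 0) ne ((k : Int) + (L.toNat : Int)) "" 0 (by omega) (by omega)]
    have : (k : Int) + (L.toNat : Int) = ((k + L.toNat : Nat) : Int) := by push_cast; ring
    rw [this, PySem.List.pyGetD_natCast]

theorem split_subsequences_changed : Claim_changed_split_subsequences := by
  unfold Claim_changed_split_subsequences; decide

theorem split_subsequences_tight : Claim_exact_split_subsequences := by
  intro ne L _ hpre hd heq
  unfold Pre_split_subsequences at hpre
  unfold D_split_subsequences at hd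
  rw [pvB_neg ne L hd, pvA_maps] at heq
  have h2 := congrArg Prod.snd heq
  simp only [] at h2
  have hlen := congrArg List.length h2
  rw [List.length_map, PySem.List.length_pyRange_one] at hlen
  simp at hlen
  omega
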